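-- pv_equiv track=rewrite | github.com/esuminede/TurkishSummarizer | main.py | rebuild_sentences_from_tokens
-- ===== SOURCE A (Python) =====
-- from typing import List, Tuple
--
-- def rebuild_sentences_from_tokens(tokens: List[str]) -> List[str]:
--     combined_sentences: List[str] = []
--     current_sentence: List[str] = []
--     for word in tokens:
--         current_sentence.append(word)
--         if word in ['.', '!', '?']:
--             new_sentence = ' '.join(current_sentence)
--             combined_sentences.append(new_sentence)
--             current_sentence = []
--     if current_sentence:
--         sentence = ' '.join(current_sentence)
--         combined_sentences.append(sentence)
--     return combined_sentences
-- ===== SOURCE B (Python) =====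
-- from typing import List, Tuple
--
--
-- def _split_at_first_boundary(rest: List[str]) -> Tuple[List[str], List[str]]:
--     """Split rest into (head, tail) where tail starts at the first '.', '!' or '?'.
--
--     If there is no boundary, tail is empty and head is the whole prefix walked."""
--     head: List[str] = []
--     for k, w in enumerate(rest):
--         if w in ('.', '!', '?'):
--             return head, rest[k:]
--         head.append(w)
--     return head, []
--
--
-- def rebuild_sentences_from_tokens(tokens: List[str]) -> List[str]:
--     sentences: List[str] = []
--     rest = tokens
--     while rest:
--         head, tail = _split_at_first_boundary(rest)
--         if not tail:
--             sentences.append(' '.join(rest))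
--             break
--         sentences.append(' '.join(head + [tail[0]]))
--         rest = tail[1:]
--     return sentences
-- ===== Notes on version B (the rewrite author's own statement) =====
-- stated objective: alternative
-- what changed: B repeatedly splits the remaining token list at the first sentence-final punctuation mark and joins whole slices, instead of A's single pass that flushes a growing accumulator list at each punctuation token.
import Mathlib
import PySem

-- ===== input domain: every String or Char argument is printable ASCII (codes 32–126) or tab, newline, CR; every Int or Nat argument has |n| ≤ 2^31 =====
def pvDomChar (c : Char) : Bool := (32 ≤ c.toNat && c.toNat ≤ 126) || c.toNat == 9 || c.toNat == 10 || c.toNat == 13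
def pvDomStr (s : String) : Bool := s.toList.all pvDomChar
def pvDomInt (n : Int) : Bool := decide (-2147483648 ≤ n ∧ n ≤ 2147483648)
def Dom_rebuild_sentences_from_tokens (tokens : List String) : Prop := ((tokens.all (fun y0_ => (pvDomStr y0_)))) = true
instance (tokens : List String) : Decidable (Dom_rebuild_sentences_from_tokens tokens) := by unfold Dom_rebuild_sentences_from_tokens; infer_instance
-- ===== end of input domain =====

-- B rebuilds the sentences by repeatedly splitting the remaining tokens at the first
-- sentence-final punctuation mark and joining whole slices, instead of A's single pass
-- that flushes a growing accumulator at each punctuation token (objective: alternative).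

-- ===== PORT A =====
-- loop body of A's for-loop: state = (combined_sentences, current_sentence)
def stepA (s : List String × List String) (word : String) : List String × List String :=
  let cur := s.2 ++ [word]
  if word == "." || word == "!" || word == "?" then
    (s.1 ++ [PySem.Str.join " " cur], [])
  else
    (s.1, cur)

def rebuild_sentences_from_tokens (tokens : List String) : List String :=
  let r := tokens.foldl stepA ([], [])
  match r.2 with
  | [] => r.1
  | _ :: _ => r.1 ++ [PySem.Str.join " " r.2]

-- ===== PORT B =====
def isBoundary (w : String) : Bool := w == "." || w == "!" || w == "?"

-- _split_at_first_boundary of Source B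
def splitAtFirstBoundary : List String → List String × List String
  | [] => ([], [])
  | w :: ws =>
    if isBoundary w then ([], w :: ws)
    else
      let r := splitAtFirstBoundary ws
      (w :: r.1, r.2)

-- needed by the termination argument of port B
theorem splitAtFirstBoundary_tail_len (l : List String) :
    (splitAtFirstBoundary l).2.length ≤ l.length := by
  induction l with
  | nil => simp [splitAtFirstBoundary]
  | cons w ws ih =>
    simp only [splitAtFirstBoundary]
    split
    · simp
    · simpa using Nat.le_succ_of_le ih

def rebuild_sentences_from_tokens_alt : List String → List String
  | [] => []
  | w :: ws =>
    match _h : (splitAtFirstBoundary (w :: ws)).2 with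
    | [] => [PySem.Str.join " " (w :: ws)]
    | p :: tail =>
        PySem.Str.join " " ((splitAtFirstBoundary (w :: ws)).1 ++ [p]) ::
          rebuild_sentences_from_tokens_alt tail
termination_by ts => ts.length
decreasing_by
  have hl := splitAtFirstBoundary_tail_len (w :: ws)
  rw [_h] at hl
  simp at hl ⊢
  omega

-- ===== PRECONDITION & SPEC =====
def Spec_rebuild_sentences_from_tokens (tokens : List String) (out : List String) : Prop := out = rebuild_sentences_from_tokens_alt tokens
instance (tokens : List String) (out : List String) : Decidable (Spec_rebuild_sentences_from_tokens tokens out) := by unfold Spec_rebuild_sentences_from_tokens; infer_instance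

-- ===== CLAIM (what is proved, stated in full; the proofs are below) =====
def Claim_equal_rebuild_sentences_from_tokens : Prop := ∀ (tokens : List String), Dom_rebuild_sentences_from_tokens tokens → Spec_rebuild_sentences_from_tokens tokens (rebuild_sentences_from_tokens tokens)

-- ===== LEMMAS AND PROOFS =====

-- A's post-loop flush, as a function of the final state
def finA (s : List String × List String) : List String :=
  match s.2 with
  | [] => s.1
  | _ :: _ => s.1 ++ [PySem.Str.join " " s.2]

theorem finA_acc (a : List String) (x : List String × List String) :
    finA (a ++ x.1, x.2) = a ++ finA x := by
  cases h : x.2 <;> simp [finA, h]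

theorem foldl_stepA_acc (ts : List String) (acc cur : List String) :
    ts.foldl stepA (acc, cur) =
      (acc ++ (ts.foldl stepA ([], cur)).1, (ts.foldl stepA ([], cur)).2) := by
  induction ts generalizing acc cur with
  | nil => simp
  | cons w ws ih =>
    by_cases hb : (w == "." || w == "!" || w == "?") = true
    · rw [List.foldl_cons, List.foldl_cons,
          show stepA (acc, cur) w = (acc ++ [PySem.Str.join " " (cur ++ [w])], []) by
            simp [stepA, hb],
          show stepA (([] : List String), cur) w = ([PySem.Str.join " " (cur ++ [w])], []) by
            simp [stepA, hb],
          ih (acc ++ [PySem.Str.join " " (cur ++ [w])]) [],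
          ih [PySem.Str.join " " (cur ++ [w])] []]
      simp
    · rw [List.foldl_cons, List.foldl_cons,
          show stepA (acc, cur) w = (acc, cur ++ [w]) by simp [stepA, hb],
          show stepA (([] : List String), cur) w = ([], cur ++ [w]) by simp [stepA, hb]]
      exact ih acc (cur ++ [w])

-- B's recursion, generalized over the words already collected for the current sentence
def goAux (cur ts : List String) : List String :=
  match (splitAtFirstBoundary ts).2 with
  | [] => if cur ++ ts = [] then [] else [PySem.Str.join " " (cur ++ ts)]
  | p :: tail =>
      PySem.Str.join " " (cur ++ (splitAtFirstBoundary ts).1 ++ [p]) ::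
        rebuild_sentences_from_tokens_alt tail

theorem goAux_nil_eq_alt (ts : List String) :
    goAux [] ts = rebuild_sentences_from_tokens_alt ts := by
  cases ts with
  | nil => simp [goAux, splitAtFirstBoundary, rebuild_sentences_from_tokens_alt]
  | cons w ws =>
    rw [rebuild_sentences_from_tokens_alt]
    cases h : (splitAtFirstBoundary (w :: ws)).2 with
    | nil => simp [goAux, h]
    | cons p tail => simp [goAux, h]

theorem finA_foldl_eq_goAux (ts : List String) (cur : List String) :
    finA (ts.foldl stepA ([], cur)) = goAux cur ts := by
  induction ts generalizing cur with
  | nil =>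
    cases cur <;> simp [finA, goAux, splitAtFirstBoundary]
  | cons w ws ih =>
    by_cases hb : (w == "." || w == "!" || w == "?") = true
    · have hsplit : splitAtFirstBoundary (w :: ws) = ([], w :: ws) := by
        simp [splitAtFirstBoundary, isBoundary, hb]
      rw [List.foldl_cons,
          show stepA (([] : List String), cur) w = ([PySem.Str.join " " (cur ++ [w])], []) by
            simp [stepA, hb]]
      rw [foldl_stepA_acc ws [PySem.Str.join " " (cur ++ [w])] [], finA_acc,
          ih [], goAux_nil_eq_alt]
      simp [goAux, hsplit]
    · have hsplit : splitAtFirstBoundary (w :: ws) =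
          (w :: (splitAtFirstBoundary ws).1, (splitAtFirstBoundary ws).2) := by
        simp [splitAtFirstBoundary, isBoundary, hb]
      rw [List.foldl_cons,
          show stepA (([] : List String), cur) w = ([], cur ++ [w]) by simp [stepA, hb],
          ih (cur ++ [w])]
      cases h : (splitAtFirstBoundary ws).2 with
      | nil => simp [goAux, hsplit, h]
      | cons p tail => simp [goAux, hsplit, h]

-- ===== VERDICT (by name: the statement is the Claim_ definition above) =====
theorem rebuild_sentences_from_tokens_spec : Claim_equal_rebuild_sentences_from_tokens := by
  intro tokens _
  show rebuild_sentences_from_tokens tokens = rebuild_sentences_from_tokens_alt tokens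
  have hA : rebuild_sentences_from_tokens tokens = finA (tokens.foldl stepA ([], [])) := by
    simp [rebuild_sentences_from_tokens, finA]
  rw [hA, finA_foldl_eq_goAux, goAux_nil_eq_alt]
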